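-- pv_equiv track=rewrite | github.com/scylladb/scylla-cluster-tests | performance_regression_gradual_grow_throughput.py | _step_names
-- ===== SOURCE A (Python) =====
-- def _step_names(step_names, total_counts):
--     """
--     Helper function to generate names based on throttle_steps and num_threads.
--     Example:
--         step_names = ["100", "unthrottled", "unthrottled"]
--         total_counts = {"unthrottled": 2, "100": 1}
--         Result: ["100", "unthrottled_1", "unthrottled_2"]
--     """
--     step_seen = {}
--     result = []
--     for name in step_names:
--         step_seen[name] = step_seen.get(name, 0) + 1
--         if total_counts[name] > 1:
--             result.append(f"{name}_{step_seen[name]}")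
--         else:
--             result.append(name)
--     return result
-- ===== SOURCE B (Python) =====
-- def _step_names(step_names, total_counts):
--     positions = {}
--     for i, name in enumerate(step_names):
--         positions.setdefault(name, []).append(i)
--     result = [None] * len(step_names)
--     for name, idxs in positions.items():
--         count = total_counts[name]
--         for j, i in enumerate(idxs, 1):
--             result[i] = f"{name}_{j}" if count > 1 else name
--     return result
-- ===== Notes on version B (the rewrite author's own statement) =====
-- stated objective: alternative
-- what changed: Replaces A's single pass with a running seen-counter dict by a two-phase algorithm: first group the occurrence indices of each name into a dict, then allocate a result array and fill each group's slots with rank-suffixed names (suffixing still governed by total_counts[name] > 1).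
import Mathlib
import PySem

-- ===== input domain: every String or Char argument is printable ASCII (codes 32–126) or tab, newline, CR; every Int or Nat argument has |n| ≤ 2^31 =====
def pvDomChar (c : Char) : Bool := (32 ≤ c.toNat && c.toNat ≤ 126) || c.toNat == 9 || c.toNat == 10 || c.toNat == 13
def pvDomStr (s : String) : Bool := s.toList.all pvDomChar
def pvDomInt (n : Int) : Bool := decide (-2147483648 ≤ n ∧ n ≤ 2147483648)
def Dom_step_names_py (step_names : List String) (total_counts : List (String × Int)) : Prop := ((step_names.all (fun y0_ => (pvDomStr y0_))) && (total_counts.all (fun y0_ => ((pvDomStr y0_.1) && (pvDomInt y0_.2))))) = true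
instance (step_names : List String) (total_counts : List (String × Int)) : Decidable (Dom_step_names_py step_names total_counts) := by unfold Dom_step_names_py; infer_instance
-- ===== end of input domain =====

-- B replaces A's one-pass seen-counter loop by a two-phase algorithm: group the occurrence
-- indices of each name, then fill a preallocated result array group by group (alternative).

-- ===== PORT A =====
-- literal transliteration: fold carrying (step_seen dict, result list)
def step_names_py (step_names : List String) (total_counts : List (String × Int)) : List String :=
  (step_names.foldl
    (fun (st : PySem.Dict String Int × List String) name =>
      let seen := st.1.insert name (st.1.getD name 0 + 1)
      let res :=
        if (PySem.Dict.ofList total_counts).getD name 0 > 1 then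
          st.2 ++ [name ++ "_" ++ PySem.Int.toStr (seen.getD name 0)]
        else
          st.2 ++ [name]
      (seen, res))
    (PySem.Dict.empty, [])).2

-- ===== PORT B =====
-- literal transliteration of Source B: phase 1 groups occurrence indices per name
-- (setdefault(name, []).append(i) = Dict.modify name [] (· ++ [i])); phase 2 allocates
-- result ([None]*n ported with "" placeholders — every cell is overwritten before return)
-- and fills each group's cells (result[i] = v is pySetD; indices come from enumerate, in range).
def step_names_py_alt (step_names : List String) (total_counts : List (String × Int)) : List String :=
  let positions := (PySem.List.enumerate step_names).foldl
    (fun (d : PySem.Dict String (List Int)) q => d.modify q.2 [] (· ++ [q.1])) PySem.Dict.empty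
  let result := List.replicate step_names.length ""
  positions.items.foldl
    (fun r p =>
      let count := (PySem.Dict.ofList total_counts).getD p.1 0
      (PySem.List.enumerate p.2 1).foldl
        (fun r q =>
          PySem.List.pySetD r q.2
            (if count > 1 then p.1 ++ "_" ++ PySem.Int.toStr q.1 else p.1)) r)
    result

-- ===== PRECONDITION & SPEC =====
-- A raises KeyError (total_counts[name]) when some step name is missing from total_counts;
-- B raises the same KeyError there; Pre_ excludes exactly those inputs.
def Pre_step_names_py (step_names : List String) (total_counts : List (String × Int)) : Prop :=
  (step_names.all (fun n => (PySem.Dict.ofList total_counts).contains n)) = true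
instance (step_names : List String) (total_counts : List (String × Int)) : Decidable (Pre_step_names_py step_names total_counts) := by unfold Pre_step_names_py; infer_instance

def pvWitness_step_names_py : List String × (List (String × Int)) :=
  (["100", "unthrottled", "unthrottled"], [("unthrottled", 2), ("100", 1)])

def Spec_step_names_py (step_names : List String) (total_counts : List (String × Int)) (out : List String) : Prop := out = step_names_py_alt step_names total_counts
instance (step_names : List String) (total_counts : List (String × Int)) (out : List String) : Decidable (Spec_step_names_py step_names total_counts out) := by unfold Spec_step_names_py; infer_instance

-- ===== CLAIM (what is proved, stated in full; the proofs are below) =====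
def Claim_equal_step_names_py : Prop := ∀ (step_names : List String) (total_counts : List (String × Int)), Dom_step_names_py step_names total_counts → Pre_step_names_py step_names total_counts → Spec_step_names_py step_names total_counts (step_names_py step_names total_counts)

-- ===== LEMMAS AND PROOFS =====

-- the common characterisation: i-th output element after prefix p
def pvOut (tc : List (String × Int)) (p : List String) (name : String) : String :=
  if (PySem.Dict.ofList tc).getD name 0 > 1 then
    name ++ "_" ++ PySem.Int.toStr ((p.count name : Int) + 1)
  else name

def pvG (tc : List (String × Int)) (p rest : List String) : List String :=
  match rest with
  | [] => []
  | name :: t => pvOut tc p name :: pvG tc (p ++ [name]) t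

-- A's fold, related to pvG via the seen-dict invariant
lemma foldA_eq_pvG (tc : List (String × Int)) :
    ∀ (rest p : List String) (seen : PySem.Dict String Int) (acc : List String),
      (∀ n, seen.getD n 0 = (p.count n : Int)) →
      (rest.foldl
        (fun (st : PySem.Dict String Int × List String) name =>
          let seen := st.1.insert name (st.1.getD name 0 + 1)
          let res :=
            if (PySem.Dict.ofList tc).getD name 0 > 1 then
              st.2 ++ [name ++ "_" ++ PySem.Int.toStr (seen.getD name 0)]
            else
              st.2 ++ [name]
          (seen, res)) (seen, acc)).2 = acc ++ pvG tc p rest := by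
  intro rest
  induction rest with
  | nil => intro p seen acc h; simp [pvG]
  | cons name t ih =>
    intro p seen acc h
    simp only [List.foldl_cons]
    have hseen : ∀ n, (seen.insert name (seen.getD name 0 + 1)).getD n 0
        = ((p ++ [name]).count n : Int) := by
      intro n
      rw [PySem.Dict.getD_insert]
      by_cases hn : n = name
      · subst hn; simp [h n, List.count_append]
      · simp [hn, h n, List.count_append, Ne.symm hn]
    rw [ih (p ++ [name]) _ _ hseen]
    simp only [pvG, pvOut, PySem.Dict.getD_insert_self, h name]
    split_ifs <;> simp

lemma length_pvG (tc : List (String × Int)) :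
    ∀ (rest p : List String), (pvG tc p rest).length = rest.length := by
  intro rest
  induction rest with
  | nil => intro p; simp [pvG]
  | cons name t ih => intro p; simp [pvG, ih]

lemma pvG_getElem? (tc : List (String × Int)) :
    ∀ (rest p : List String) (k : Nat),
      (pvG tc p rest)[k]? = rest[k]?.map (fun name => pvOut tc (p ++ rest.take k) name) := by
  intro rest
  induction rest with
  | nil => intro p k; simp [pvG]
  | cons name t ih =>
    intro p k
    cases k with
    | zero => simp [pvG]
    | succ k => simp [pvG, ih (p ++ [name]) k, List.append_assoc]

-- the occurrence-index list phase 1 stores for a name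
def pvOcc (sn : List String) (name : String) : List Int :=
  ((PySem.List.enumerate sn).filter (fun q => q.2 == name)).map (·.1)

lemma pvOcc_spec (name : String) :
    ∀ (l p : List String) (k : Nat) (i : Int),
      (((PySem.List.enumerate l (p.length : Int)).filter (fun q => q.2 == name)).map (·.1))[k]?
        = some i →
      ∃ m : Nat, i = ((p.length + m : Nat) : Int) ∧ m < l.length ∧
        l[m]? = some name ∧ (l.take m).count name = k := by
  intro l
  induction l with
  | nil => intro p k i h; simp [PySem.List.enumerate_nil] at h
  | cons x t ih =>
    intro p k i h
    rw [PySem.List.enumerate_cons] at h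
    have hlenpx : ((p.length : Int) + 1) = (((p ++ [x]).length : Nat) : Int) := by
      simp
    by_cases hx : x = name
    · subst hx
      simp only [List.filter_cons, BEq.rfl, if_true] at h
      cases k with
      | zero =>
        simp only [List.map_cons, List.getElem?_cons_zero, Option.some.injEq] at h
        exact ⟨0, by omega, by simp, by simp, by simp⟩
      | succ k =>
        simp only [List.map_cons, List.getElem?_cons_succ] at h
        rw [hlenpx] at h
        obtain ⟨m, him, hm, hget, hcnt⟩ := ih (p ++ [x]) k i h
        simp only [List.length_append, List.length_cons, List.length_nil] at him
        refine ⟨m + 1, by omega,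
          by simpa using Nat.succ_lt_succ hm, by simpa using hget, ?_⟩
        simp [List.take_succ_cons, hcnt]
    · have hne : (x == name) = false := by simp [hx]
      simp only [List.filter_cons, hne, Bool.false_eq_true, if_false] at h
      rw [hlenpx] at h
      obtain ⟨m, him, hm, hget, hcnt⟩ := ih (p ++ [x]) k i h
      simp only [List.length_append, List.length_cons, List.length_nil] at him
      refine ⟨m + 1, by omega,
        by simpa using Nat.succ_lt_succ hm, by simpa using hget, ?_⟩
      simp [List.take_succ_cons, hcnt, hx]

lemma pvOcc_mem (sn : List String) (name : String) (m : Nat)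
    (hm : m < sn.length) (hget : sn[m]? = some name) : ((m : Nat) : Int) ∈ pvOcc sn name := by
  unfold pvOcc
  have heq : sn[m] = name := by
    rw [List.getElem?_eq_getElem hm] at hget
    exact Option.some.inj hget
  have hmem : ((m : Int), name) ∈ PySem.List.enumerate sn := by
    rw [PySem.List.mem_enumerate_iff]
    exact ⟨m, hm, by simp [heq]⟩
  exact List.mem_map.mpr ⟨((m : Int), name), List.mem_filter.mpr ⟨hmem, by simp⟩, rfl⟩

lemma pvOcc_nodup (sn : List String) (name : String) : (pvOcc sn name).Nodup := by
  rw [List.nodup_iff_injective_get]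
  intro a b hab
  have ha := List.getElem?_eq_getElem a.isLt
  have hb := List.getElem?_eq_getElem b.isLt
  have ha' := pvOcc_spec name sn [] a ((pvOcc sn name).get a) (by simpa [pvOcc] using ha)
  have hb' := pvOcc_spec name sn [] b ((pvOcc sn name).get b) (by simpa [pvOcc, ← hab] using hb)
  obtain ⟨m, him, _, _, hcnt⟩ := ha'
  obtain ⟨m', him', _, _, hcnt'⟩ := hb'
  have : m = m' := by omega
  subst this
  exact Fin.ext (by rw [← hcnt, ← hcnt'])

-- the inner fold of phase 2 for one group, as a named function
def pvFill (name : String) (c : Int) (vs : List Int) (s : Int) (r : List String) : List String :=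
  (PySem.List.enumerate vs s).foldl
    (fun r q =>
      PySem.List.pySetD r q.2
        (if c > 1 then name ++ "_" ++ PySem.Int.toStr q.1 else name)) r

-- untouched cells keep their value, listed cells get the rank-suffixed name
lemma pvFill_spec (name : String) (c : Int) :
    ∀ (vs : List Int) (s : Int) (r : List String),
      vs.Nodup → (∀ i ∈ vs, 0 ≤ i ∧ i.toNat < r.length) →
      (pvFill name c vs s r).length = r.length ∧
      (∀ m : Nat, ((m : Int)) ∉ vs → (pvFill name c vs s r)[m]? = r[m]?) ∧
      (∀ (k : Nat) (i : Int), vs[k]? = some i →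
        (pvFill name c vs s r)[i.toNat]?
          = some (if c > 1 then name ++ "_" ++ PySem.Int.toStr (s + k) else name)) := by
  intro vs
  induction vs with
  | nil =>
    intro s r _ _
    refine ⟨rfl, fun m _ => rfl, fun k i hk => by simp at hk⟩
  | cons i0 t ih =>
    intro s r hnd hin
    have h0 : 0 ≤ i0 ∧ i0.toNat < r.length := hin i0 (by simp)
    have hunf : pvFill name c (i0 :: t) s r
        = pvFill name c t (s + 1)
            (PySem.List.pySetD r i0 (if c > 1 then name ++ "_" ++ PySem.Int.toStr s else name)) := by
      unfold pvFill
      rw [PySem.List.enumerate_cons, List.foldl_cons]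
    have hset : PySem.List.pySetD r i0 (if c > 1 then name ++ "_" ++ PySem.Int.toStr s else name)
        = r.set i0.toNat (if c > 1 then name ++ "_" ++ PySem.Int.toStr s else name) :=
      PySem.List.pySetD_of_nonneg r _ h0.1
    have hin' : ∀ i ∈ t, 0 ≤ i ∧ i.toNat
        < (PySem.List.pySetD r i0 (if c > 1 then name ++ "_" ++ PySem.Int.toStr s else name)).length := by
      intro i hi
      rw [hset, List.length_set]
      exact hin i (by simp [hi])
    obtain ⟨ihlen, ihun, ihw⟩ := ih (s + 1) _ hnd.of_cons hin'
    rw [hunf]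
    refine ⟨by rw [ihlen, hset, List.length_set], ?_, ?_⟩
    · intro m hm
      rw [ihun m (fun h => hm (List.mem_cons_of_mem _ h)), hset, List.getElem?_set_ne]
      intro h
      exact hm (by simp only [List.mem_cons]; left; omega)
    · intro k i hk
      cases k with
      | zero =>
        simp only [List.getElem?_cons_zero, Option.some.injEq] at hk
        have hki : i = i0 := hk.symm
        subst hki
        have hnot : ((i.toNat : Nat) : Int) ∉ t := by
          rw [Int.toNat_of_nonneg h0.1]
          exact (List.nodup_cons.mp hnd).1
        rw [ihun i.toNat hnot, hset, List.getElem?_set_self h0.2]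
        simp
      | succ k =>
        simp only [List.getElem?_cons_succ] at hk
        rw [ihw k i hk,
          show s + 1 + (k : Int) = s + (((k + 1 : Nat)) : Int) from by push_cast; ring]

-- phase 1 result: getD gives pvOcc, items enumerate the distinct names with their pvOcc
lemma positions_getD (sn : List String) (name : String) :
    (((PySem.List.enumerate sn).foldl
        (fun (d : PySem.Dict String (List Int)) q => d.modify q.2 [] (· ++ [q.1]))
        PySem.Dict.empty)).getD name [] = pvOcc sn name := by
  rw [show ((PySem.List.enumerate sn).foldl
        (fun (d : PySem.Dict String (List Int)) q => d.modify q.2 [] (· ++ [q.1]))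
        PySem.Dict.empty)
      = (((PySem.List.enumerate sn).map (fun q => (q.2, q.1))).foldl
        (fun (d : PySem.Dict String (List Int)) p => d.modify p.1 [] (· ++ [p.2]))
        PySem.Dict.empty)
      from (List.foldl_map (f := fun (q : Int × String) => (q.2, q.1))
        (g := fun (d : PySem.Dict String (List Int)) p => d.modify p.1 [] (· ++ [p.2]))).symm]
  rw [PySem.Dict.getD_foldl_modify_append]
  simp [pvOcc, PySem.Dict.getD_empty, List.filter_map, Function.comp_def]

lemma positions_items (sn : List String) :
    (((PySem.List.enumerate sn).foldl
        (fun (d : PySem.Dict String (List Int)) q => d.modify q.2 [] (· ++ [q.1]))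
        PySem.Dict.empty)).items
      = (PySem.Set.ofList sn).map (fun name => (name, pvOcc sn name)) := by
  have hnd : ((PySem.List.enumerate sn).foldl
      (fun (d : PySem.Dict String (List Int)) q => d.modify q.2 [] (· ++ [q.1]))
      PySem.Dict.empty).keys.Nodup :=
    PySem.Dict.nodup_keys_foldl_modify_key (PySem.List.enumerate sn)
      (fun q => q.2) [] (fun _ q v => v ++ [q.1]) PySem.Dict.empty PySem.Dict.nodup_keys_empty
  have hkeys : ((PySem.List.enumerate sn).foldl
      (fun (d : PySem.Dict String (List Int)) q => d.modify q.2 [] (· ++ [q.1]))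
      PySem.Dict.empty).keys = PySem.Set.ofList sn := by
    refine (PySem.Dict.keys_foldl_modify_key (PySem.List.enumerate sn)
      (fun q => q.2) [] (fun _ q v => v ++ [q.1]) PySem.Dict.empty).trans ?_
    rw [show (PySem.List.enumerate sn).map (fun q => q.2) = sn
      from PySem.List.map_snd_enumerate sn 0]
    rfl
  rw [PySem.Dict.items_eq_map_keys _ hnd [], hkeys]
  refine List.map_congr_left ?_
  intro name _
  rw [positions_getD]

-- B's fold equals pvG
lemma foldB_eq_pvG (sn : List String) (tc : List (String × Int)) :
    step_names_py_alt sn tc = pvG tc [] sn := by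
  have hmain : ∀ (L : List String) (r : List String),
      r.length = sn.length →
      (∀ m : Nat, m < sn.length →
        (∀ nm, sn[m]? = some nm → nm ∉ L) → r[m]? = (pvG tc [] sn)[m]?) →
      (L.map (fun name => (name, pvOcc sn name))).foldl
        (fun r p => pvFill p.1 ((PySem.Dict.ofList tc).getD p.1 0) p.2 1 r) r
        = pvG tc [] sn := by
    intro L
    induction L with
    | nil =>
      intro r hrl hinv
      simp only [List.map_nil, List.foldl_nil]
      refine List.ext_getElem? ?_
      intro m
      by_cases hm : m < sn.length
      · exact hinv m hm (fun nm _ => by simp)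
      · rw [List.getElem?_eq_none (by omega),
          List.getElem?_eq_none (by rw [length_pvG]; omega)]
    | cons name rest ih =>
      intro r hrl hinv
      simp only [List.map_cons, List.foldl_cons]
      have hvs_in : ∀ i ∈ pvOcc sn name, 0 ≤ i ∧ i.toNat < r.length := by
        intro i hi
        obtain ⟨k, hk⟩ := List.getElem?_of_mem hi
        obtain ⟨m, him, hm, _, _⟩ := pvOcc_spec name sn [] k i (by simpa [pvOcc] using hk)
        simp only [List.length_nil, Nat.zero_add] at him
        exact ⟨by omega, by rw [hrl]; omega⟩
      obtain ⟨hlen, hun, hw⟩ := pvFill_spec name ((PySem.Dict.ofList tc).getD name 0)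
        (pvOcc sn name) 1 r (pvOcc_nodup sn name) hvs_in
      apply ih
      · rw [hlen, hrl]
      · intro m hm hnot
        by_cases hname : sn[m]? = some name
        · -- cell m belongs to this group: pvFill wrote tgt[m]
          have hmem := pvOcc_mem sn name m hm hname
          obtain ⟨k, hk⟩ := List.getElem?_of_mem hmem
          have hwk := hw k ((m : Nat) : Int) hk
          obtain ⟨m', him', hm', hget', hcnt'⟩ :=
            pvOcc_spec name sn [] k _ (by simpa [pvOcc] using hk)
          simp only [List.length_nil, Nat.zero_add] at him'
          have hmm' : m = m' := by omega
          subst hmm'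
          rw [Int.toNat_natCast] at hwk
          rw [hwk, pvG_getElem?, hname]
          simp only [List.nil_append, Option.map_some, Option.some.injEq]
          rw [pvOut]
          split_ifs
          · rw [hcnt',
              show (1 : Int) + (k : Int) = ((k : Int) + 1) from by ring]
          · rfl
        · -- untouched by this group
          have hnotin : ((m : Nat) : Int) ∉ pvOcc sn name := by
            intro hmem
            obtain ⟨k, hk⟩ := List.getElem?_of_mem hmem
            obtain ⟨m', him', _, hget', _⟩ :=
              pvOcc_spec name sn [] k _ (by simpa [pvOcc] using hk)
            simp only [List.length_nil, Nat.zero_add] at him'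
            have : m = m' := by omega
            exact hname (this ▸ hget')
          rw [hun m hnotin]
          exact hinv m hm (fun nm hnm hin => by
            rcases List.mem_cons.mp hin with h | h
            · exact hname (h ▸ hnm)
            · exact hnot nm hnm h)
  have happ := hmain (PySem.Set.ofList sn) (List.replicate sn.length "")
    (List.length_replicate)
    (by
      intro m hm hnot
      exfalso
      obtain ⟨h', hval⟩ := List.getElem?_eq_some_iff.mp (List.getElem?_eq_getElem hm)
      exact hnot sn[m] (List.getElem?_eq_getElem hm)
        (by rw [PySem.Set.mem_ofList]; exact List.getElem_mem hm))
  calc step_names_py_alt sn tc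
      = (((PySem.Set.ofList sn).map (fun name => (name, pvOcc sn name))).foldl
          (fun r p => pvFill p.1 ((PySem.Dict.ofList tc).getD p.1 0) p.2 1 r)
          (List.replicate sn.length "")) := by
        show ((((PySem.List.enumerate sn).foldl
            (fun (d : PySem.Dict String (List Int)) q => d.modify q.2 [] (· ++ [q.1]))
            PySem.Dict.empty)).items).foldl
            (fun r p => pvFill p.1 ((PySem.Dict.ofList tc).getD p.1 0) p.2 1 r)
            (List.replicate sn.length "") = _
        rw [positions_items]
    _ = pvG tc [] sn := happ

-- ===== VERDICT (by name: the statement is the Claim_ definition above) =====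
theorem step_names_py_spec : Claim_equal_step_names_py := by
  intro sn tc _ _
  unfold Spec_step_names_py step_names_py
  rw [foldA_eq_pvG tc sn [] PySem.Dict.empty [] (by intro n; simp [PySem.Dict.getD_empty]),
    foldB_eq_pvG]
  simp
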